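-- pv_equiv track=rewrite | github.com/huihuilanlan/my_circuit | iccad_mpw.py | touch_edge
-- ===== SOURCE A (Python) =====
-- def sdist(x, y):
--     '''Return squared distance with respect to the (0, 0) origin,
--     which is the center of wafer
--     '''
--     return x * x + y * y
--
-- def touch_edge(x,y,w,h,x_c,y_c,radius):
--     dot_list = ((x-x_c,y-y_c),(x-x_c,y-y_c+h),(x-x_c+w,y-y_c),(x-x_c+w,y-y_c+h))
--     out_circle = 0
--     for dot in dot_list:
--         if(sdist(dot[0],dot[1])>radius**2):
--             if(out_circle * 1 == -1):
--                 return True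
--             out_circle = 1
--         else:
--             if(out_circle * -1 == -1):
--                 return True
--             out_circle = -1
--     return False
-- ===== SOURCE B (Python) =====
-- def sdist(x, y):
--     return x * x + y * y
--
-- def touch_edge(x, y, w, h, x_c, y_c, radius):
--     r2 = radius ** 2
--     d1 = sdist(x - x_c, y - y_c)
--     d2 = sdist(x - x_c, y - y_c + h)
--     d3 = sdist(x - x_c + w, y - y_c)
--     d4 = sdist(x - x_c + w, y - y_c + h)
--     return min(d1, d2, d3, d4) <= r2 < max(d1, d2, d3, d4)
-- ===== Notes on version B (the rewrite author's own statement) =====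
-- stated objective: simpler
-- what changed: Replaced the running +1/-1 sign-change flag loop over the corners by a loop-free extreme-value test: nearest corner inside-or-on (min squared distance <= r^2) and farthest corner strictly outside (max > r^2).
import Mathlib
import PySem

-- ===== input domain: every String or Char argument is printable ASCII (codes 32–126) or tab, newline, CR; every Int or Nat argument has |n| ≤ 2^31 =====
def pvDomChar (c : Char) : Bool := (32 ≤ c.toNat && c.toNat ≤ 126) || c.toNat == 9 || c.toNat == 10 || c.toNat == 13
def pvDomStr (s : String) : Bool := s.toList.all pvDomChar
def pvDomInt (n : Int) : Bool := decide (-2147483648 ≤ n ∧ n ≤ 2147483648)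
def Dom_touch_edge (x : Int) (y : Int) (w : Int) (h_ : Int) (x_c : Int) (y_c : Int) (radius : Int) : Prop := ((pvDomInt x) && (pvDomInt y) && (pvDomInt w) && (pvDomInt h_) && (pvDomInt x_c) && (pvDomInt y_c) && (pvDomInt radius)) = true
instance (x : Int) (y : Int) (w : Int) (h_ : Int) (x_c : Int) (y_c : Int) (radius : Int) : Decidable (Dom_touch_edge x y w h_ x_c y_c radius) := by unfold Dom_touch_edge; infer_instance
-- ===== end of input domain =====

-- B replaces A's running ±1 sign-change flag over the corners by a min/max extreme-value
-- comparison of the four corner squared distances (objective: simpler).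

-- ===== PORT A =====
def sdist (x : Int) (y : Int) : Int := x * x + y * y

-- the for-loop with early returns, as recursion over the remaining dots with the flag state
def touchLoopA (r2 : Int) : List (Int × Int) → Int → Bool
  | [], _ => false
  | dot :: rest, out_circle =>
    if sdist dot.1 dot.2 > r2 then
      if out_circle * 1 == -1 then true else touchLoopA r2 rest 1
    else
      if out_circle * (-1) == -1 then true else touchLoopA r2 rest (-1)

def touch_edge (x : Int) (y : Int) (w : Int) (h_ : Int) (x_c : Int) (y_c : Int) (radius : Int) : Bool :=
  let dot_list : List (Int × Int) :=
    [(x - x_c, y - y_c), (x - x_c, y - y_c + h_), (x - x_c + w, y - y_c), (x - x_c + w, y - y_c + h_)]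
  touchLoopA (radius ^ 2) dot_list 0

-- ===== PORT B =====
def touch_edge_alt (x : Int) (y : Int) (w : Int) (h_ : Int) (x_c : Int) (y_c : Int) (radius : Int) : Bool :=
  let r2 := radius ^ 2
  let d1 := sdist (x - x_c) (y - y_c)
  let d2 := sdist (x - x_c) (y - y_c + h_)
  let d3 := sdist (x - x_c + w) (y - y_c)
  let d4 := sdist (x - x_c + w) (y - y_c + h_)
  min (min (min d1 d2) d3) d4 ≤ r2 && r2 < max (max (max d1 d2) d3) d4

-- ===== PRECONDITION & SPEC =====
def Spec_touch_edge (x : Int) (y : Int) (w : Int) (h_ : Int) (x_c : Int) (y_c : Int) (radius : Int) (out : Bool) : Prop := out = touch_edge_alt x y w h_ x_c y_c radius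
instance (x : Int) (y : Int) (w : Int) (h_ : Int) (x_c : Int) (y_c : Int) (radius : Int) (out : Bool) : Decidable (Spec_touch_edge x y w h_ x_c y_c radius out) := by unfold Spec_touch_edge; infer_instance

-- ===== CLAIM (what is proved, stated in full; the proofs are below) =====
def Claim_equal_touch_edge : Prop := ∀ (x : Int) (y : Int) (w : Int) (h_ : Int) (x_c : Int) (y_c : Int) (radius : Int), Dom_touch_edge x y w h_ x_c y_c radius → Spec_touch_edge x y w h_ x_c y_c radius (touch_edge x y w h_ x_c y_c radius)

-- ===== LEMMAS AND PROOFS =====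
theorem touchLoopA_minmax (r2 : Int) (p1 p2 p3 p4 : Int × Int) :
    touchLoopA r2 [p1, p2, p3, p4] 0 =
      (min (min (min (sdist p1.1 p1.2) (sdist p2.1 p2.2)) (sdist p3.1 p3.2)) (sdist p4.1 p4.2) ≤ r2 &&
       r2 < max (max (max (sdist p1.1 p1.2) (sdist p2.1 p2.2)) (sdist p3.1 p3.2)) (sdist p4.1 p4.2)) := by
  simp only [touchLoopA]
  generalize sdist p1.1 p1.2 = d1
  generalize sdist p2.1 p2.2 = d2
  generalize sdist p3.1 p3.2 = d3
  generalize sdist p4.1 p4.2 = d4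
  by_cases h1 : d1 > r2 <;> by_cases h2 : d2 > r2 <;> by_cases h3 : d3 > r2 <;> by_cases h4 : d4 > r2 <;>
    simp [h1, h2, h3, h4] <;> omega

-- ===== VERDICT (by name: the statement is the Claim_ definition above) =====
theorem touch_edge_spec : Claim_equal_touch_edge := by
  intro x y w h_ x_c y_c radius _
  unfold Spec_touch_edge touch_edge touch_edge_alt
  exact touchLoopA_minmax (radius ^ 2) _ _ _ _
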